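-- pv_equiv track=rewrite | github.com/pgrzesiecki/adventofcode | 2023/3.py | prepare_schema
-- ===== SOURCE A (Python) =====
-- def prepare_schema(lines):
--     schema = []
--     numbers_schema = {}
--     num_start = None
--     num_end = None
--
--     def add_to_number_schema(num_start, num_end, line_idx, numbers_schema):
--         if num_start is not None and num_end is not None:
--             if line_idx not in numbers_schema:
--                 numbers_schema[line_idx] = []
--
--             numbers_schema[line_idx].append((num_start, num_end))
--
--         return numbers_schema
--
--     for line_idx, line in enumerate(lines):
--         if line == "":
--             continue
--
--         if line_idx not in schema:
--             schema.append([])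
--
--         for char_idx, char in enumerate(line):
--             if char_idx not in schema[line_idx]:
--                 schema[line_idx].append([])
--
--             schema[line_idx][char_idx] = char
--
--             if char.isdigit():
--                 if num_start is None:
--                     num_start = char_idx
--
--                 num_end = char_idx
--             else:
--                 numbers_schema = add_to_number_schema(
--                     num_start, num_end, line_idx, numbers_schema
--                 )
--
--                 num_start = None
--                 num_end = None
--
--         numbers_schema = add_to_number_schema(
--             num_start, num_end, line_idx, numbers_schema
--         )
--
--         num_start = None
--         num_end = None
--
--     return (schema, numbers_schema)
-- ===== SOURCE B (Python) =====
-- def prepare_schema(lines):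
--     # Same schema-building skeleton as the original (empty-line continue, append +
--     # schema[line_idx] assignment, so behaviour on malformed inputs is unchanged), but the
--     # num_start/num_end state machine is replaced by an index-jumping digit-run scanner.
--     schema = []
--     numbers_schema = {}
--     for line_idx, line in enumerate(lines):
--         if line == "":
--             continue
--         schema.append([])
--         schema[line_idx] = list(line)
--         runs = []
--         i, n = 0, len(line)
--         while i < n:
--             if line[i].isdigit():
--                 j = i
--                 while j + 1 < n and line[j + 1].isdigit():
--                     j += 1
--                 runs.append((i, j))
--                 i = j + 1
--             else:
--                 i += 1
--         if runs:
--             numbers_schema[line_idx] = runs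
--     return (schema, numbers_schema)
-- ===== Notes on version B (the rewrite author's own statement) =====
-- stated objective: faster
-- what changed: B drops A's num_start/num_end optional-state machine, its add_to_number_schema helper and its per-character 'char_idx not in schema[line_idx]' membership scan (always true, but a linear scan of the row for every character): each row is just list(line), and digit runs are found by an index-jumping scanner (find a run's start, extend to its end, emit (start,end), jump past it), with the dict entry created once per line only when runs exist; the schema-indexing skeleton is kept so behaviour on malformed (empty-line-before-content) inputs is unchanged.
import Mathlib
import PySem

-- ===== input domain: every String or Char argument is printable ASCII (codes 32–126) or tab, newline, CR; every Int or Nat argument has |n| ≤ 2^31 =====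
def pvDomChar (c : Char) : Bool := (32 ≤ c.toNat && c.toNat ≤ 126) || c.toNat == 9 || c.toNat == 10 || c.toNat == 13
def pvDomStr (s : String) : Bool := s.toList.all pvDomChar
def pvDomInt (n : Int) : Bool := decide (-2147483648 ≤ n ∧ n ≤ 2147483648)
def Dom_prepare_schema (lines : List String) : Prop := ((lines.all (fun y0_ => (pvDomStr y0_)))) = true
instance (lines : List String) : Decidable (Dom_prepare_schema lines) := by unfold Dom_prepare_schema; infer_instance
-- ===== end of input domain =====

-- B replaces A's num_start/num_end state machine and its per-character row-membership scan (a linear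
-- scan per character) with list(line) rows and an index-jumping digit-run scanner; measured faster.


-- ===== PORT A =====
-- helper add_to_number_schema: 'if line_idx not in numbers_schema: numbers_schema[line_idx] = []'
-- then 'numbers_schema[line_idx].append((num_start, num_end))'
def pvAddToNumberSchema (num_start num_end : Option Int) (line_idx : Int)
    (numbers_schema : PySem.Dict Int (List (Int × Int))) : PySem.Dict Int (List (Int × Int)) :=
  match num_start, num_end with
  | some s, some e =>
      let ns := if numbers_schema.contains line_idx then numbers_schema
                else numbers_schema.insert line_idx []
      ns.insert line_idx (ns.getD line_idx [] ++ [(s, e)])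
  | _, _ => numbers_schema

-- inner loop body, one step per (char_idx, char) of enumerate(line).
-- 'char_idx not in schema[line_idx]' compares an int with one-char strings: always True in Python,
-- so each step appends [] and overwrites it with the char; net effect row := row ++ [char].
def pvInnerStepA (line_idx : Int)
    (st : List String × PySem.Dict Int (List (Int × Int)) × Option Int × Option Int)
    (cp : Int × Char) :
    List String × PySem.Dict Int (List (Int × Int)) × Option Int × Option Int :=
  let row := st.1 ++ [String.ofList [cp.2]]
  if PySem.Chars.isdigit cp.2 then
    (row, st.2.1, (match st.2.2.1 with | none => some cp.1 | some s => some s), some cp.1)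
  else
    (row, pvAddToNumberSchema st.2.2.1 st.2.2.2 line_idx st.2.1, none, none)

-- outer loop body, one step per (line_idx, line) of enumerate(lines).
-- 'line_idx not in schema' compares an int with list rows: always True in Python, so a fresh [] row
-- is appended, then the inner loop fills schema[line_idx] (pySetD: IndexError outside Pre_, where
-- line_idx exceeds the number of rows appended so far because empty lines were skipped).
def pvLineStepA
    (st : List (List String) × PySem.Dict Int (List (Int × Int)) × Option Int × Option Int)
    (p : Int × String) :
    List (List String) × PySem.Dict Int (List (Int × Int)) × Option Int × Option Int :=
  if p.2 = "" then st
  else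
    let schema := st.1 ++ [[]]
    let inner := (PySem.List.enumerate p.2.toList).foldl (pvInnerStepA p.1) ([], st.2.1, st.2.2.1, st.2.2.2)
    let schema := PySem.List.pySetD schema p.1 inner.1
    let ns := pvAddToNumberSchema inner.2.2.1 inner.2.2.2 p.1 inner.2.1
    (schema, ns, none, none)

def prepare_schema (lines : List String) : List (List String) × (List (Int × List (Int × Int))) :=
  let st := (PySem.List.enumerate lines).foldl pvLineStepA ([], PySem.Dict.empty, none, none)
  (st.1, st.2.1.items)

-- ===== PORT B =====
-- inner 'while j + 1 < n and line[j + 1].isdigit(): j += 1', as a fuel recursion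
-- (fuel = cs.length always suffices; kept structural so the kernel can evaluate it)
def pvExtendRunF (cs : List Char) : Nat → Nat → Nat
  | 0, j => j
  | fuel + 1, j =>
      if h : j + 1 < cs.length then
        if PySem.Chars.isdigit cs[j + 1] then pvExtendRunF cs fuel (j + 1) else j
      else j

def pvExtendRun (cs : List Char) (j : Nat) : Nat := pvExtendRunF cs cs.length j

-- outer 'while i < n' run scanner of B, i starting at 0 (same fuel scheme)
def pvRunsF (cs : List Char) : Nat → Nat → List (Int × Int)
  | 0, _ => []
  | fuel + 1, i =>
      if h : i < cs.length then
        if PySem.Chars.isdigit cs[i] then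
          ((i : Int), (pvExtendRun cs i : Int)) :: pvRunsF cs fuel (pvExtendRun cs i + 1)
        else pvRunsF cs fuel (i + 1)
      else []

def pvRuns (cs : List Char) : List (Int × Int) := pvRunsF cs (cs.length + 1) 0

-- one step per (line_idx, line) of enumerate(lines); the schema half keeps A's skeleton
-- (append [] then assign schema[line_idx] = list(line); pySetD: IndexError outside Pre_);
-- B's dict only ever gains fresh keys (line_idx is strictly increasing), so the insertion
-- is a plain append to the association list.
def pvLineStepB (st : List (List String) × List (Int × List (Int × Int))) (p : Int × String) :
    List (List String) × List (Int × List (Int × Int)) :=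
  if p.2 = "" then st
  else
    let runs := pvRuns p.2.toList
    (PySem.List.pySetD (st.1 ++ [[]]) p.1 (p.2.toList.map (fun c => String.ofList [c])),
     if runs = [] then st.2 else st.2 ++ [(p.1, runs)])

def prepare_schema_alt (lines : List String) : List (List String) × (List (Int × List (Int × Int))) :=
  (PySem.List.enumerate lines).foldl pvLineStepB ([], [])

-- ===== PRECONDITION & SPEC =====
-- Pre_ excludes exactly the inputs on which A raises IndexError: an empty line followed later by a
-- nonempty line (schema[line_idx] is then past the end, since empty lines append no row).
def Pre_prepare_schema (lines : List String) : Prop :=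
  (lines.dropWhile (fun l => !(l == ""))).all (fun l => l == "") = true
instance (lines : List String) : Decidable (Pre_prepare_schema lines) := by
  unfold Pre_prepare_schema; infer_instance

def pvWitness_prepare_schema : List String := ["467..114", "...*", "", ""]

def Spec_prepare_schema (lines : List String) (out : List (List String) × (List (Int × List (Int × Int)))) : Prop := out = prepare_schema_alt lines
instance (lines : List String) (out : List (List String) × (List (Int × List (Int × Int)))) : Decidable (Spec_prepare_schema lines out) := by unfold Spec_prepare_schema; infer_instance

-- ===== CLAIM (what is proved, stated in full; the proofs are below) =====
def Claim_equal_prepare_schema : Prop := ∀ (lines : List String), Dom_prepare_schema lines → Pre_prepare_schema lines → Spec_prepare_schema lines (prepare_schema lines)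

-- ===== LEMMAS AND PROOFS =====

-- reference run list: pvRunsW o k cs = digit runs of cs, whose first char has index k,
-- with o an already-open run carried in
def pvRunsW (o : Option (Int × Int)) (k : Int) (cs : List Char) : List (Int × Int) :=
  match cs with
  | [] => o.toList
  | c :: cs =>
      if PySem.Chars.isdigit c then
        pvRunsW (some (match o with | none => (k, k) | some (s, _) => (s, k))) (k + 1) cs
      else o.toList ++ pvRunsW none (k + 1) cs

theorem pvExtendRunF_ge (cs : List Char) : ∀ (fuel j : Nat), j ≤ pvExtendRunF cs fuel j := by
  intro fuel
  induction fuel with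
  | zero => intro j; simp [pvExtendRunF]
  | succ fuel ih =>
      intro j
      simp only [pvExtendRunF]
      split
      · split
        · exact le_trans (by omega) (ih (j + 1))
        · exact le_rfl
      · exact le_rfl

theorem pvRunsW_open (cs : List Char) : ∀ (fuel j : Nat) (s : Int),
    j < cs.length → cs.length ≤ fuel + j + 1 →
    pvRunsW (some (s, (j : Int))) ((j : Int) + 1) (cs.drop (j + 1)) =
      (s, (pvExtendRunF cs fuel j : Int)) ::
        pvRunsW none ((pvExtendRunF cs fuel j : Int) + 1) (cs.drop (pvExtendRunF cs fuel j + 1)) := by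
  intro fuel
  induction fuel with
  | zero =>
      intro j s hj hlen
      have hd : cs.drop (j + 1) = [] := List.drop_eq_nil_of_le (by omega)
      simp [pvExtendRunF, hd, pvRunsW]
  | succ fuel ih =>
      intro j s hj hlen
      simp only [pvExtendRunF]
      split
      · rename_i h1
        have hd : cs.drop (j + 1) = cs[j + 1] :: cs.drop (j + 2) := by
          rw [List.drop_eq_getElem_cons h1]
        split
        · rename_i h2
          rw [hd]
          simp only [pvRunsW, h2, if_pos]
          have := ih (j + 1) s h1 (by omega)
          push_cast at this ⊢
          convert this using 3 <;> push_cast <;> ring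
        · rename_i h2
          rw [hd]
          simp only [pvRunsW, h2, Bool.false_eq_true, if_neg, not_false_iff]
          simp
      · rename_i h1
        have hd : cs.drop (j + 1) = [] := List.drop_eq_nil_of_le (by omega)
        simp [hd, pvRunsW]

theorem pvRunsF_eq (cs : List Char) : ∀ (fuel i : Nat), cs.length ≤ fuel + i →
    pvRunsF cs fuel i = pvRunsW none (i : Int) (cs.drop i) := by
  intro fuel
  induction fuel with
  | zero =>
      intro i hlen
      have hd : cs.drop i = [] := List.drop_eq_nil_of_le (by omega)
      simp [pvRunsF, hd, pvRunsW]
  | succ fuel ih =>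
      intro i hlen
      simp only [pvRunsF]
      split
      · rename_i hi
        have hd : cs.drop i = cs[i] :: cs.drop (i + 1) := List.drop_eq_getElem_cons hi
        split
        · rename_i hdig
          rw [hd]
          simp only [pvRunsW, hdig, if_pos]
          have hgei : i ≤ pvExtendRun cs i := pvExtendRunF_ge cs cs.length i
          have ho := pvRunsW_open cs cs.length i (i : Int) hi (by omega)
          rw [show pvExtendRunF cs cs.length i = pvExtendRun cs i from rfl] at ho
          rw [ho]
          congr 1
          rw [ih (pvExtendRun cs i + 1) (by omega)]
          push_cast
          ring_nf
        · rename_i hdig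
          rw [hd]
          simp only [pvRunsW, hdig, Bool.false_eq_true, if_neg, not_false_iff,
            Option.toList_none, List.nil_append]
          rw [ih (i + 1) (by omega)]
          push_cast
          ring_nf
      · rename_i hi
        have hd : cs.drop i = [] := List.drop_eq_nil_of_le (by omega)
        simp [hd, pvRunsW]

theorem pvRuns_eq (cs : List Char) : pvRuns cs = pvRunsW none 0 cs := by
  have := pvRunsF_eq cs (cs.length + 1) 0 (by omega)
  simpa [pvRuns] using this

-- the packed dict contents while scanning line `k`
def pvPack (k : Int) (acc : List (Int × Int)) : List (Int × List (Int × Int)) :=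
  if acc = [] then [] else [(k, acc)]

theorem pvMapBase (base : List (Int × List (Int × Int))) (k : Int)
    (hk : ∀ p ∈ base, (p.1 == k) = false) (v : List (Int × Int)) :
    base.map (fun p => if p.1 == k then (k, v) else p) = base := by
  conv_rhs => rw [← List.map_id base]
  apply List.map_congr_left
  intro p hp
  simp [hk p hp]

theorem pvFlush_pack (base : List (Int × List (Int × Int))) (k : Int)
    (hk : ∀ p ∈ base, (p.1 == k) = false) (acc : List (Int × Int)) (s e : Int) :
    pvAddToNumberSchema (some s) (some e) k ⟨base ++ pvPack k acc⟩ =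
      ⟨base ++ pvPack k (acc ++ [(s, e)])⟩ := by
  have hfindN : List.find? (fun p => p.1 == k) base = none := by
    rw [List.find?_eq_none]; intro p hp; simp [hk p hp]
  cases acc with
  | nil =>
      have hc : (PySem.Dict.mk (κ := Int) (ν := List (Int × Int)) base).contains k = false := by
        simp only [PySem.Dict.contains, List.any_eq_false]
        intro p hp; simp [hk p hp]
      have hins : (PySem.Dict.mk (κ := Int) (ν := List (Int × Int)) base).insert k [] =
          ⟨base ++ [(k, [])]⟩ := by
        simp only [PySem.Dict.insert, hc, Bool.false_eq_true, if_neg, not_false_iff]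
      have hfind : List.find? (fun p => p.1 == k) (base ++ [(k, ([] : List (Int × Int)))]) =
          some (k, []) := by
        rw [List.find?_append, hfindN]; simp
      have hc2 : (PySem.Dict.mk (κ := Int) (ν := List (Int × Int)) (base ++ [(k, [])])).contains k = true := by
        simp [PySem.Dict.contains]
      simp only [pvAddToNumberSchema, pvPack, if_true, reduceIte, List.append_nil,
        List.nil_append, hc, Bool.false_eq_true, if_false, hins]
      simp only [PySem.Dict.insert, hc2, if_true, PySem.Dict.getD, PySem.Dict.get?, hfind,
        Option.map_some, Option.getD_some, List.nil_append]
      congr 1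
      rw [List.map_append, pvMapBase base k hk]
      simp
  | cons a acc' =>
      simp only [pvAddToNumberSchema, pvPack, if_neg (List.cons_ne_nil a acc')]
      have hc : (PySem.Dict.mk (κ := Int) (ν := List (Int × Int)) (base ++ [(k, a :: acc')])).contains k = true := by
        simp [PySem.Dict.contains]
      simp only [hc, if_pos]
      have hfind : List.find? (fun p => p.1 == k) (base ++ [(k, a :: acc')]) =
          some (k, a :: acc') := by
        rw [List.find?_append, hfindN]; simp
      simp only [PySem.Dict.insert, hc, if_pos, PySem.Dict.getD, PySem.Dict.get?, hfind]
      simp only [Option.map_some, Option.getD_some]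
      rw [if_neg (by simp : ¬(a :: acc' ++ [(s, e)] = []))]
      congr 1
      rw [List.map_append, pvMapBase base k hk]
      simp

-- the machine lemma: A's inner fold followed by the final flush equals appending pvRunsW
theorem pvMachine (k : Int) (cs : List Char) : ∀ (k0 : Int) (row : List String)
    (base : List (Int × List (Int × Int))) (acc : List (Int × Int)) (o : Option (Int × Int)),
    (∀ p ∈ base, (p.1 == k) = false) →
    ((PySem.List.enumerate cs k0).foldl (pvInnerStepA k)
        (row, ⟨base ++ pvPack k acc⟩, o.map Prod.fst, o.map Prod.snd)).1 =
      row ++ cs.map (fun c => String.ofList [c]) ∧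
    (let r := (PySem.List.enumerate cs k0).foldl (pvInnerStepA k)
        (row, ⟨base ++ pvPack k acc⟩, o.map Prod.fst, o.map Prod.snd);
     pvAddToNumberSchema r.2.2.1 r.2.2.2 k r.2.1 = ⟨base ++ pvPack k (acc ++ pvRunsW o k0 cs)⟩) := by
  induction cs with
  | nil =>
      intro k0 row base acc o hk
      simp only [PySem.List.enumerate_nil, List.foldl_nil]
      cases o with
      | none => simp [pvAddToNumberSchema, pvRunsW]
      | some p =>
          refine ⟨by simp, ?_⟩
          simp only [Option.map_some]
          rw [pvFlush_pack base k hk acc p.1 p.2]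
          simp [pvRunsW]
  | cons c cs ih =>
      intro k0 row base acc o hk
      rw [PySem.List.enumerate_cons]
      simp only [List.foldl_cons]
      cases o with
      | none =>
          by_cases hdig : PySem.Chars.isdigit c
          · have hstep : pvInnerStepA k (row, ⟨base ++ pvPack k acc⟩, Option.map Prod.fst (none : Option (Int × Int)), Option.map Prod.snd (none : Option (Int × Int))) (k0, c) =
                (row ++ [String.ofList [c]], ⟨base ++ pvPack k acc⟩,
                  Option.map Prod.fst (some ((k0 : Int), (k0 : Int))), Option.map Prod.snd (some ((k0 : Int), (k0 : Int)))) := by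
              simp [pvInnerStepA, hdig]
            rw [hstep]
            have h := ih (k0 + 1) (row ++ [String.ofList [c]]) base acc (some (k0, k0)) hk
            refine ⟨?_, ?_⟩
            · rw [h.1]; simp
            · have h2 := h.2
              simp only at h2 ⊢
              rw [h2]
              simp [pvRunsW, hdig]
          · have hstep : pvInnerStepA k (row, ⟨base ++ pvPack k acc⟩, Option.map Prod.fst (none : Option (Int × Int)), Option.map Prod.snd (none : Option (Int × Int))) (k0, c) =
                (row ++ [String.ofList [c]], ⟨base ++ pvPack k acc⟩,
                  Option.map Prod.fst (none : Option (Int × Int)), Option.map Prod.snd (none : Option (Int × Int))) := by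
              simp [pvInnerStepA, hdig, pvAddToNumberSchema]
            rw [hstep]
            have h := ih (k0 + 1) (row ++ [String.ofList [c]]) base acc none hk
            refine ⟨?_, ?_⟩
            · rw [h.1]; simp
            · have h2 := h.2
              simp only at h2 ⊢
              rw [h2]
              simp [pvRunsW, hdig]
      | some pr =>
          by_cases hdig : PySem.Chars.isdigit c
          · have hstep : pvInnerStepA k (row, ⟨base ++ pvPack k acc⟩, Option.map Prod.fst (some pr), Option.map Prod.snd (some pr)) (k0, c) =
                (row ++ [String.ofList [c]], ⟨base ++ pvPack k acc⟩,
                  Option.map Prod.fst (some (pr.1, (k0 : Int))), Option.map Prod.snd (some (pr.1, (k0 : Int)))) := by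
              simp [pvInnerStepA, hdig]
            rw [hstep]
            have h := ih (k0 + 1) (row ++ [String.ofList [c]]) base acc (some (pr.1, k0)) hk
            refine ⟨?_, ?_⟩
            · rw [h.1]; simp
            · have h2 := h.2
              simp only at h2 ⊢
              rw [h2]
              simp [pvRunsW, hdig]
          · have hstep : pvInnerStepA k (row, ⟨base ++ pvPack k acc⟩, Option.map Prod.fst (some pr), Option.map Prod.snd (some pr)) (k0, c) =
                (row ++ [String.ofList [c]], ⟨base ++ pvPack k (acc ++ [(pr.1, pr.2)])⟩,
                  Option.map Prod.fst (none : Option (Int × Int)), Option.map Prod.snd (none : Option (Int × Int))) := by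
              simp only [pvInnerStepA, hdig, Bool.false_eq_true, if_neg, not_false_iff,
                Option.map_some]
              rw [pvFlush_pack base k hk acc pr.1 pr.2]
              simp
            rw [hstep]
            have h := ih (k0 + 1) (row ++ [String.ofList [c]]) base (acc ++ [(pr.1, pr.2)]) none hk
            refine ⟨?_, ?_⟩
            · rw [h.1]; simp
            · have h2 := h.2
              simp only at h2 ⊢
              rw [h2]
              simp [pvRunsW, hdig]

theorem pvSetLast {α : Type} (xs : List α) (k : Nat) (h : xs.length = k) (y v : α) :
    (xs ++ [y]).set k v = xs ++ [v] := by
  subst h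
  induction xs with
  | nil => rfl
  | cons x xs ih => simpa [List.set] using ih

theorem pvSuffixA (S : List String) : ∀ (k : Int)
    (st : List (List String) × PySem.Dict Int (List (Int × Int)) × Option Int × Option Int),
    (∀ l ∈ S, l = "") →
    (PySem.List.enumerate S k).foldl pvLineStepA st = st := by
  induction S with
  | nil => intro k st _; rfl
  | cons l S ih =>
      intro k st hS
      rw [PySem.List.enumerate_cons, List.foldl_cons]
      have hl : l = "" := hS l (by simp)
      simp only [pvLineStepA, hl]
      simp only [if_true, reduceIte]
      exact ih _ _ (fun x hx => hS x (by simp [hx]))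

theorem pvSuffixB (S : List String) : ∀ (k : Int)
    (st : List (List String) × List (Int × List (Int × Int))),
    (∀ l ∈ S, l = "") →
    (PySem.List.enumerate S k).foldl pvLineStepB st = st := by
  induction S with
  | nil => intro k st _; rfl
  | cons l S ih =>
      intro k st hS
      rw [PySem.List.enumerate_cons, List.foldl_cons]
      have hl : l = "" := hS l (by simp)
      simp only [pvLineStepB, hl]
      simp only [if_true, reduceIte]
      exact ih _ _ (fun x hx => hS x (by simp [hx]))

theorem pvPrefix (P : List String) : ∀ (k : Nat) (sch : List (List String))
    (ns : PySem.Dict Int (List (Int × Int))),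
    (∀ l ∈ P, l ≠ "") → sch.length = k → (∀ q ∈ ns.items, q.1 < (k : Int)) →
    ((PySem.List.enumerate P (k : Int)).foldl pvLineStepA (sch, ns, none, none)).1 =
      ((PySem.List.enumerate P (k : Int)).foldl pvLineStepB (sch, ns.items)).1 ∧
    ((PySem.List.enumerate P (k : Int)).foldl pvLineStepA (sch, ns, none, none)).2.1.items =
      ((PySem.List.enumerate P (k : Int)).foldl pvLineStepB (sch, ns.items)).2 := by
  induction P with
  | nil => intro k sch ns _ _ _; exact ⟨rfl, rfl⟩
  | cons l P ih =>
      intro k sch ns hP hsch hns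
      have hl : l ≠ "" := hP l (by simp)
      rw [PySem.List.enumerate_cons, List.foldl_cons, List.foldl_cons]
      have hk : ∀ p ∈ ns.items, (p.1 == k) = false := by
        intro p hp
        have := hns p hp
        simp only [beq_eq_false_iff_ne, ne_eq]
        omega
      have hnsmk : (⟨ns.items ++ pvPack (k : Int) []⟩ : PySem.Dict Int (List (Int × Int))) = ns := by
        apply PySem.Dict.ext
        show ns.items ++ pvPack (k : Int) [] = ns.items
        simp [pvPack]
      have hmach := pvMachine (k : Int) l.toList 0 [] ns.items [] none hk
      simp only [Option.map_none] at hmach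
      rw [hnsmk] at hmach
      have hrow := hmach.1
      have hflush := hmach.2
      simp only at hflush
      -- compute the A step
      have hA : pvLineStepA (sch, ns, none, none) ((k : Int), l) =
          (sch ++ [l.toList.map (fun c => String.ofList [c])],
           ⟨ns.items ++ pvPack (k : Int) (pvRuns l.toList)⟩, none, none) := by
        simp only [pvLineStepA, if_neg hl]
        refine Prod.ext ?_ (Prod.ext ?_ rfl)
        · simp only [hrow, List.nil_append]
          rw [PySem.List.pySetD_natCast]
          exact pvSetLast sch k hsch [] _
        · simp only [hrow]
          rw [hflush]
          simp [pvRuns_eq, pvRunsW]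
      -- compute the B step
      have hB : pvLineStepB (sch, ns.items) ((k : Int), l) =
          (sch ++ [l.toList.map (fun c => String.ofList [c])],
           ns.items ++ pvPack (k : Int) (pvRuns l.toList)) := by
        simp only [pvLineStepB, if_neg hl]
        refine Prod.ext ?_ ?_
        · rw [PySem.List.pySetD_natCast]
          exact pvSetLast sch k hsch [] _
        · simp only [pvPack]
          split
          · simp
          · rfl
      rw [hA, hB]
      have hcast : ((k : Int) + 1) = ((k + 1 : Nat) : Int) := by push_cast; ring
      rw [hcast]
      apply ih (k + 1)
      · exact fun x hx => hP x (by simp [hx])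
      · simp [hsch]
      · intro q hq
        simp only at hq
        rcases List.mem_append.mp hq with h | h
        · have := hns q h; push_cast; omega
        · simp only [pvPack] at h
          split at h
          · simp at h
          · simp only [List.mem_singleton] at h
            subst h; push_cast; omega

-- ===== VERDICT (by name: the statement is the Claim_ definition above) =====
theorem prepare_schema_spec : Claim_equal_prepare_schema := by
  unfold Claim_equal_prepare_schema
  intro lines _ hpre
  unfold Spec_prepare_schema
  have hsplit : lines.takeWhile (fun l => !(l == "")) ++ lines.dropWhile (fun l => !(l == "")) = lines :=
    List.takeWhile_append_dropWhile
  have hP : ∀ l ∈ lines.takeWhile (fun l => !(l == "")), l ≠ "" := by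
    intro l hl
    have := List.mem_takeWhile_imp hl
    simpa using this
  have hS : ∀ l ∈ lines.dropWhile (fun l => !(l == "")), l = "" := by
    intro l hl
    unfold Pre_prepare_schema at hpre
    rw [List.all_eq_true] at hpre
    simpa using hpre l hl
  unfold prepare_schema prepare_schema_alt
  rw [← hsplit]
  rw [PySem.List.enumerate_append, List.foldl_append, List.foldl_append]
  rw [pvSuffixA _ _ _ hS, pvSuffixB _ _ _ hS]
  have h0 : (0 : Int) = ((0 : Nat) : Int) := rfl
  rw [h0]
  have := pvPrefix (lines.takeWhile (fun l => !(l == ""))) 0 [] PySem.Dict.empty hP rfl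
    (by intro q hq; simp [PySem.Dict.empty] at hq)
  exact Prod.ext this.1 this.2
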